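-- pv_equiv track=rewrite | github.com/nwh/mal | impls/nwh/printer.py | pr_string
-- ===== SOURCE A (Python) =====
-- def pr_string(exp, print_readably=False):
--
--     if print_readably:
--         chars = []
--         for exp_char in exp:
--             if exp_char == "\n":
--                 chars.append("\\n")
--             elif exp_char == "\\":
--                 chars.append("\\\\")
--             elif exp_char == '"':
--                 chars.append('\\"')
--             else:
--                 chars.append(exp_char)
--         string = '"' + "".join(chars) + '"'
--     else:
--         string = exp
--
--     return string
-- ===== SOURCE B (Python) =====
-- def pr_string(exp, print_readably=False):
--     if print_readably:
--         return '"' + exp.replace("\\", "\\\\").replace('"', '\\"').replace("\n", "\\n") + '"'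
--     return exp
-- ===== Notes on version B (the rewrite author's own statement) =====
-- stated objective: idiomatic
-- what changed: Replaces the explicit per-character loop with list accumulator and join by a chained str.replace (backslash first, then quote and newline) wrapped in quotes.
import Mathlib
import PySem

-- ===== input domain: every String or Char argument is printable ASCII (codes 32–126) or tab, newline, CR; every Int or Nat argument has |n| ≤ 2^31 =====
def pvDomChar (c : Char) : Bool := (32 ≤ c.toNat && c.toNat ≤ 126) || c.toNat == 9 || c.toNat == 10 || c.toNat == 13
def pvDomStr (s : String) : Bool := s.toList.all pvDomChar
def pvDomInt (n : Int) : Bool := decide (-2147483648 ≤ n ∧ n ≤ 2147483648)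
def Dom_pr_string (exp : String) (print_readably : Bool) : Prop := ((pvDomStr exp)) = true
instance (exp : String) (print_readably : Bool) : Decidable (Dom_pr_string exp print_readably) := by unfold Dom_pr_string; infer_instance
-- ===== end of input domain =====

-- B: replaces A's per-character loop by a chained str.replace (backslash first), a more idiomatic decomposition; same cost.


-- ===== PORT A =====
def pr_string (exp : String) (print_readably : Bool) : String :=
  if print_readably then
    let chars : List String := exp.toList.foldl (fun acc c =>
      if c = '\n' then acc ++ ["\\n"]
      else if c = '\\' then acc ++ ["\\\\"]
      else if c = '"' then acc ++ ["\\\""]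
      else acc ++ [String.singleton c]) []
    "\"" ++ PySem.Str.join "" chars ++ "\""
  else exp

-- ===== PORT B =====
def pr_string_alt (exp : String) (print_readably : Bool) : String :=
  if print_readably then
    "\"" ++ PySem.Str.replace (PySem.Str.replace (PySem.Str.replace exp "\\" "\\\\") "\"" "\\\"") "\n" "\\n" ++ "\""
  else exp

-- ===== PRECONDITION & SPEC =====
def Spec_pr_string (exp : String) (print_readably : Bool) (out : String) : Prop := out = pr_string_alt exp print_readably
instance (exp : String) (print_readably : Bool) (out : String) : Decidable (Spec_pr_string exp print_readably out) := by unfold Spec_pr_string; infer_instance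

-- ===== CLAIM (what is proved, stated in full; the proofs are below) =====
def Claim_equal_pr_string : Prop := ∀ (exp : String) (print_readably : Bool), Dom_pr_string exp print_readably → Spec_pr_string exp print_readably (pr_string exp print_readably)

-- ===== LEMMAS AND PROOFS =====

-- A's per-character escape, as a function on characters
def escA (c : Char) : List Char :=
  if c = '\n' then ['\\', 'n']
  else if c = '\\' then ['\\', '\\']
  else if c = '"' then ['\\', '"']
  else [c]

-- replacing a single character is a flatMap
theorem replace_go_single (o : Char) (nw : List Char) :
    ∀ (l acc : List Char) (fuel : Nat), l.length ≤ fuel →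
      PySem.Chars.replace.go [o] nw fuel l acc
        = acc.reverse ++ l.flatMap (fun c => if c = o then nw else [c]) := by
  intro l
  induction l with
  | nil =>
    intro acc fuel _
    cases fuel <;> simp [PySem.Chars.replace.go]
  | cons c t ih =>
    intro acc fuel hf
    cases fuel with
    | zero => simp at hf
    | succ n =>
      simp only [PySem.Chars.replace.go]
      by_cases h : c = o
      · subst h
        have hp : List.isPrefixOf [c] (c :: t) = true := by
          simp [List.isPrefixOf]
        rw [if_pos hp]
        simp only [List.length_cons, List.length_nil, List.drop_succ_cons, List.drop_zero]
        rw [ih _ n (by simpa using hf)]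
        simp
      · have hp : List.isPrefixOf [o] (c :: t) = false := by
          simp [List.isPrefixOf]; exact fun h' => absurd h'.symm h
        rw [if_neg (by simp [hp])]
        rw [ih _ n (by simpa using hf)]
        simp [h]

theorem replace_single (cs : List Char) (o : Char) (nw : List Char) :
    PySem.Chars.replace cs [o] nw = cs.flatMap (fun c => if c = o then nw else [c]) := by
  simp [PySem.Chars.replace]
  rw [replace_go_single o nw cs [] cs.length (le_refl _)]
  simp

-- A's foldl accumulates the per-character strings
def strA (c : Char) : String :=
  if c = '\n' then "\\n"
  else if c = '\\' then "\\\\"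
  else if c = '"' then "\\\""
  else String.singleton c

theorem foldA_eq (cs : List Char) : ∀ acc : List String,
    cs.foldl (fun acc c =>
      if c = '\n' then acc ++ ["\\n"]
      else if c = '\\' then acc ++ ["\\\\"]
      else if c = '"' then acc ++ ["\\\""]
      else acc ++ [String.singleton c]) acc = acc ++ cs.map strA := by
  induction cs with
  | nil => intro acc; simp
  | cons c t ih =>
    intro acc
    simp only [List.foldl_cons, List.map_cons]
    rw [ih]
    unfold strA
    split_ifs <;> simp

theorem strA_toList (c : Char) : (strA c).toList = escA c := by
  unfold strA escA
  split_ifs <;> simp [String.singleton]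

theorem join_flatten (sep : List Char) (hsep : sep = []) :
    ∀ parts : List (List Char), PySem.Chars.join sep parts = parts.flatten
  | [] => by simp [PySem.Chars.join_nil]
  | [p] => by simp [PySem.Chars.join_singleton]
  | p :: q :: rest => by
      rw [PySem.Chars.join_cons_cons, join_flatten sep hsep (q :: rest), hsep]
      simp

-- B's three single-character replaces compose to A's escape
theorem chain_eq (cs : List Char) :
    ((cs.flatMap (fun c => if c = '\\' then ['\\', '\\'] else [c])).flatMap
        (fun c => if c = '"' then ['\\', '"'] else [c])).flatMap
        (fun c => if c = '\n' then ['\\', 'n'] else [c])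
      = cs.flatMap escA := by
  rw [List.flatMap_assoc, List.flatMap_assoc]
  apply List.flatMap_congr
  intro c _
  unfold escA
  by_cases h1 : c = '\n'
  · subst h1; decide
  · by_cases h2 : c = '\\'
    · subst h2; decide
    · by_cases h3 : c = '"'
      · subst h3; decide
      · simp [h1, h2, h3]

-- ===== VERDICT (by name: the statement is the Claim_ definition above) =====
theorem pr_string_spec : Claim_equal_pr_string := by
  intro exp pr _
  cases pr with
  | false => simp [Spec_pr_string, pr_string, pr_string_alt]
  | true =>
    show pr_string exp true = pr_string_alt exp true
    simp only [pr_string, pr_string_alt, if_true]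
    apply String.toList_injective
    simp only [String.toList_append]
    rw [foldA_eq exp.toList []]
    have hjoin : (PySem.Str.join "" (([] : List String) ++ exp.toList.map strA)).toList
        = exp.toList.flatMap escA := by
      rw [List.nil_append]
      simp only [PySem.Str.join, String.toList_ofList]
      rw [join_flatten "".toList (by rfl) ((exp.toList.map strA).map String.toList)]
      rw [List.map_map]
      simp only [List.flatMap_def]
      congr 1
      apply List.map_congr_left
      intro c _
      exact strA_toList c
    rw [hjoin]
    have hB : (PySem.Str.replace (PySem.Str.replace (PySem.Str.replace exp "\\" "\\\\") "\"" "\\\"") "\n" "\\n").toList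
        = exp.toList.flatMap escA := by
      simp only [PySem.Str.toList_replace]
      rw [show "\\".toList = ['\\'] from rfl, show "\\\\".toList = ['\\', '\\'] from rfl,
          show "\"".toList = ['"'] from rfl, show "\\\"".toList = ['\\', '"'] from rfl,
          show "\n".toList = ['\n'] from rfl, show "\\n".toList = ['\\', 'n'] from rfl]
      rw [replace_single, replace_single, replace_single]
      exact chain_eq exp.toList
    rw [hB]
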